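-- pv_equiv track=rewrite | github.com/LovieCode/astrbot_plugin_style_learner | learner.py | _build_chat_str
-- ===== SOURCE A (Python) =====
-- def _build_chat_str(messages: list[dict]) -> str:
--     """构建匿名可读消息，不同发送者用 A/B/C... 标签，bot 用 SELF"""
--     sender_map: dict[str, str] = {}
--     next_label = ord("A")
--     lines = []
--     for i, msg in enumerate(messages):
--         role = msg.get("role", "")
--         sender_name = msg.get("sender_name", "")
--         if role == "assistant" or not sender_name:
--             label = "SELF"
--         else:
--             if sender_name not in sender_map:
--                 sender_map[sender_name] = chr(next_label)
--                 next_label += 1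
--             label = sender_map[sender_name]
--         text = msg.get("text", "")
--         lines.append(f"[{i+1}] {label}说 {text}")
--     return "\n".join(lines)
-- ===== SOURCE B (Python) =====
-- def _build_chat_str(messages: list[dict]) -> str:
--     """Order-by-first-occurrence via sorting: one reversed pass records, for each
--     named human sender, the index of its earliest message (later = earlier index
--     overwrites); sorting the senders by that index yields the label order, from
--     which a label table is built; a final pass formats the lines."""
--     first = {}
--     for i, msg in reversed(list(enumerate(messages))):
--         if msg.get("role", "") != "assistant" and msg.get("sender_name", ""):
--             first[msg.get("sender_name", "")] = i
--     labels = {name: chr(ord("A") + r)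
--               for r, name in enumerate(sorted(first, key=lambda k: first[k]))}
--     lines = []
--     for i, msg in enumerate(messages):
--         name = msg.get("sender_name", "")
--         if msg.get("role", "") == "assistant" or not name:
--             label = "SELF"
--         else:
--             label = labels[name]
--         lines.append(f"[{i+1}] {label}说 {msg.get('text', '')}")
--     return "\n".join(lines)
-- ===== Notes on version B (the rewrite author's own statement) =====
-- stated objective: alternative
-- what changed: Replaces A's single incremental loop carrying a sender_map dict and a label counter by a sort-based pipeline: a reversed pass records each human sender's earliest message index by overwriting, sorting the senders by that index yields the label order, a dict comprehension builds the label table, and a final pass only formats lines.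
import Mathlib
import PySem

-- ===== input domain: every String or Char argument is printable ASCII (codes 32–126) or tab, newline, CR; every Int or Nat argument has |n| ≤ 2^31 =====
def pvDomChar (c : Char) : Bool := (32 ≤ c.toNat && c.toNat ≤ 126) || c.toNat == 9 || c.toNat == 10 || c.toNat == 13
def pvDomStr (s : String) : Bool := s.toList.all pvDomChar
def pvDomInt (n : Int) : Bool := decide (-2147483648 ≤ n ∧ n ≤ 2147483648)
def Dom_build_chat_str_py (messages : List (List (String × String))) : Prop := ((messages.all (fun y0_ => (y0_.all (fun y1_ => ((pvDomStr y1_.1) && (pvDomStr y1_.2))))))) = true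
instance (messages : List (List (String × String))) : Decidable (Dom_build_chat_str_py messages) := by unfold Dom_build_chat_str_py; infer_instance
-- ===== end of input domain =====

-- B replaces A's incremental sender-dict+counter with a sort-based pipeline: a reversed pass records each human sender's earliest index, sorting by that index gives the label order; alternative algorithm, same purpose.


-- msg.get(k, ""): first-match lookup in the association list (the dict has unique keys)
def pvMsgGet (msg : List (String × String)) (k : String) : String :=
  match msg with
  | [] => ""
  | (k', v) :: rest => if k' == k then v else pvMsgGet rest k

-- the f-string f"[{i+1}] {label}说 {text}" (identical in A and B)
def pvLine (i : Int) (label text : String) : String :=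
  PySem.Str.join "" ["[", PySem.Int.toStr (i + 1), "] ", label, "说 ", text]

-- ===== PORT A =====
-- one iteration of A's loop over (sender_map, next_label) × lines
def pvAStep (st : (PySem.Dict String String × Int) × List String)
    (p : Int × List (String × String)) : (PySem.Dict String String × Int) × List String :=
  let sender_map := st.1.1
  let next_label := st.1.2
  let lines := st.2
  let role := pvMsgGet p.2 "role"
  let sender_name := pvMsgGet p.2 "sender_name"
  if role == "assistant" || sender_name == "" then
    ((sender_map, next_label), lines ++ [pvLine p.1 "SELF" (pvMsgGet p.2 "text")])
  else
    let sm :=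
      if sender_map.contains sender_name then (sender_map, next_label)
      else (sender_map.insert sender_name (String.ofList [Char.ofNat next_label.toNat]),
            next_label + 1)
    (sm, lines ++ [pvLine p.1 (sm.1.getD sender_name "") (pvMsgGet p.2 "text")])

def build_chat_str_py (messages : List (List (String × String))) : String :=
  let res := (PySem.List.enumerate messages 0).foldl pvAStep ((PySem.Dict.empty, (65 : Int)), [])
  PySem.Str.join "\n" res.2

-- ===== PORT B =====
-- the reversed-pass condition: a human message with a non-empty sender name
def pvHuman (msg : List (String × String)) : Bool :=
  !(pvMsgGet msg "role" == "assistant") && !(pvMsgGet msg "sender_name" == "")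

-- one step of B's reversed first pass: record (overwrite) the sender's index
def pvFirstStep (d : PySem.Dict String Int) (p : Int × List (String × String)) :
    PySem.Dict String Int :=
  if pvHuman p.2 then d.insert (pvMsgGet p.2 "sender_name") p.1 else d

-- one step of the label-table comprehension {name: chr(ord('A')+r)}
def pvLabelsStep (d : PySem.Dict String String) (p : Int × String) : PySem.Dict String String :=
  d.insert p.2 (String.ofList [Char.ofNat ((65 : Int) + p.1).toNat])

-- one step of B's formatting loop; labels[name] never raises (name was recorded
-- by the first pass), so .getD "" only discharges the Option
def pvBStep (labels : PySem.Dict String String) (acc : List String)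
    (p : Int × List (String × String)) : List String :=
  let name := pvMsgGet p.2 "sender_name"
  let label := if pvMsgGet p.2 "role" == "assistant" || name == "" then "SELF"
               else labels.getD name ""
  acc ++ [pvLine p.1 label (pvMsgGet p.2 "text")]

def build_chat_str_py_alt (messages : List (List (String × String))) : String :=
  let first := ((PySem.List.enumerate messages 0).reverse).foldl pvFirstStep PySem.Dict.empty
  let labels := (PySem.List.enumerate
      (PySem.List.sorted first.keys (fun k => first.getD k 0)) 0).foldl pvLabelsStep
      PySem.Dict.empty
  PySem.Str.join "\n" ((PySem.List.enumerate messages 0).foldl (pvBStep labels) [])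

-- ===== PRECONDITION & SPEC =====
def Spec_build_chat_str_py (messages : List (List (String × String))) (out : String) : Prop := out = build_chat_str_py_alt messages
instance (messages : List (List (String × String))) (out : String) : Decidable (Spec_build_chat_str_py messages out) := by unfold Spec_build_chat_str_py; infer_instance

-- ===== CLAIM (what is proved, stated in full; the proofs are below) =====
def Claim_equal_build_chat_str_py : Prop := ∀ (messages : List (List (String × String))), Dom_build_chat_str_py messages → Spec_build_chat_str_py messages (build_chat_str_py messages)

-- ===== LEMMAS AND PROOFS =====

-- the label for the sender with index j
def pvLabel (j : Nat) : String := String.ofList [Char.ofNat (65 + j)]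

-- the per-line value both sides compute, expressed against the first-appearance
-- sender list (proof-side specification, used to connect A's fold and B's passes)
def pvBLine (senders : List String) (p : Int × List (String × String)) : String :=
  let name := pvMsgGet p.2 "sender_name"
  let label :=
    if pvMsgGet p.2 "role" == "assistant" || name == "" then "SELF"
    else pvLabel ((PySem.List.index? senders name).getD 0)
  pvLine p.1 label (pvMsgGet p.2 "text")

-- A's incremental sender collection (first-appearance order), proof-side
def pvSenderStep (acc : List String) (msg : List (String × String)) : List String :=
  if pvHuman msg && !(acc.contains (pvMsgGet msg "sender_name"))
  then acc ++ [pvMsgGet msg "sender_name"] else acc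

-- gold: (sender, first index) pairs of an enumerated message list, in
-- first-appearance order
def pvGold : List (Int × List (String × String)) → List (String × Int)
  | [] => []
  | (i, m) :: t =>
      if pvHuman m
      then (pvMsgGet m "sender_name", i) ::
           (pvGold t).filter (fun q => !(q.1 == pvMsgGet m "sender_name"))
      else pvGold t

-- first-match lookup in pvGold
def pvLookup : List (String × Int) → String → Option Int
  | [], _ => none
  | (k, v) :: t, x => if k = x then some v else pvLookup t x

-- A's sender_map as determined by the ordered list of distinct senders seen so far
def pvDictOf (acc : List String) : PySem.Dict String String :=
  PySem.Dict.mk (acc.zipIdx.map (fun p => (p.1, pvLabel p.2)))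

theorem pvDictOf_keys (acc : List String) : (pvDictOf acc).keys = acc := by
  simp [pvDictOf, PySem.Dict.keys, List.map_map, Function.comp_def]

theorem pvDictOf_contains (acc : List String) (name : String) :
    (pvDictOf acc).contains name = acc.contains name := by
  rw [PySem.Dict.contains_eq_decide_mem_keys, pvDictOf_keys]
  simp

theorem pvDictOf_insert (acc : List String) (name : String) (h : name ∉ acc) :
    (pvDictOf acc).insert name (pvLabel acc.length) = pvDictOf (acc ++ [name]) := by
  apply PySem.Dict.ext
  rw [PySem.Dict.items_insert, if_neg (by simp [pvDictOf_contains, h])]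
  simp [pvDictOf, List.zipIdx_append]

theorem pvDictOf_getD (acc : List String) (name : String) (j : Nat)
    (hnd : acc.Nodup) (hj : PySem.List.index? acc name = some j) :
    (pvDictOf acc).getD name "" = pvLabel j := by
  obtain ⟨hk, hget, -⟩ := PySem.List.getElem_of_index?_eq_some hj
  apply PySem.Dict.getD_of_mem_items
  · simp only [pvDictOf, List.mem_map]
    refine ⟨(acc[j], j), ?_, by simp [hget]⟩
    have : acc.zipIdx[j]'(by simpa using hk) = (acc[j], j) := by simp
    exact this ▸ List.getElem_mem _
  · rw [pvDictOf_keys]; exact hnd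

theorem pvSenders_prefix (rest : List (List (String × String))) (acc : List String) :
    acc <+: rest.foldl pvSenderStep acc := by
  induction rest generalizing acc with
  | nil => simp
  | cons m ms ih =>
      refine List.IsPrefix.trans ?_ (ih (pvSenderStep acc m))
      unfold pvSenderStep
      split <;> simp

-- index of a member of acc in the full senders list equals its index in acc
theorem pvIndex_full (rest : List (List (String × String))) (acc : List String)
    (name : String) (h : name ∈ acc) :
    PySem.List.index? (rest.foldl pvSenderStep acc) name = PySem.List.index? acc name := by
  obtain ⟨t, ht⟩ := pvSenders_prefix rest acc
  rw [← ht, PySem.List.index?_append_of_mem t h]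

-- main loop invariant: A's fold from the state determined by the distinct senders acc
-- already seen produces exactly the pvBLine lines for the remaining messages
theorem pvMain (rest : List (List (String × String))) (acc : List String)
    (i : Int) (lines : List String) (hnd : acc.Nodup) :
    ((PySem.List.enumerate rest i).foldl pvAStep
        ((pvDictOf acc, (65 : Int) + acc.length), lines)).2
    = lines ++ (PySem.List.enumerate rest i).map (pvBLine (rest.foldl pvSenderStep acc)) := by
  induction rest generalizing acc i lines with
  | nil => simp
  | cons m ms ih =>
      rw [PySem.List.enumerate_cons]
      simp only [List.foldl_cons, List.map_cons]
      by_cases hself : (pvMsgGet m "role" == "assistant" || pvMsgGet m "sender_name" == "") = true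
      · -- SELF line: state unchanged, sender list unchanged
        have hstep : pvSenderStep acc m = acc := by
          unfold pvSenderStep pvHuman
          rw [if_neg]
          simp only [Bool.or_eq_true] at hself
          rcases hself with h1 | h1 <;> simp [h1]
        have hA : pvAStep ((pvDictOf acc, (65 : Int) + acc.length), lines) (i, m)
            = ((pvDictOf acc, (65 : Int) + acc.length),
               lines ++ [pvLine i "SELF" (pvMsgGet m "text")]) := by
          unfold pvAStep
          rw [if_pos hself]
        rw [hstep, hA, ih acc (i + 1) _ hnd]
        have hbl : pvBLine (ms.foldl pvSenderStep acc) (i, m)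
            = pvLine i "SELF" (pvMsgGet m "text") := by
          unfold pvBLine
          simp only [hself]
          simp
        simp [hbl]
      · -- labelled line
        simp only [Bool.or_eq_true, not_or, Bool.not_eq_true] at hself
        obtain ⟨hrole, hname⟩ := hself
        set name := pvMsgGet m "sender_name" with hnm
        by_cases hmem : name ∈ acc
        · -- already seen sender: dict and counter unchanged
          have hstep : pvSenderStep acc m = acc := by
            unfold pvSenderStep
            rw [if_neg]
            simp [← hnm, List.contains_eq_mem, hmem]
          obtain ⟨j, hj⟩ := Option.isSome_iff_exists.mp
            ((PySem.List.index?_isSome_iff acc name).mpr hmem)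
          have hA : pvAStep ((pvDictOf acc, (65 : Int) + acc.length), lines) (i, m)
              = ((pvDictOf acc, (65 : Int) + acc.length),
                 lines ++ [pvLine i ((pvDictOf acc).getD name "") (pvMsgGet m "text")]) := by
            unfold pvAStep
            rw [if_neg (by simp [hrole, ← hnm, hname])]
            simp only [← hnm, pvDictOf_contains, List.contains_eq_mem, hmem, decide_true,
              if_true]
          rw [hA, ih acc (i + 1) _ hnd, hstep]
          have hbl : pvBLine (ms.foldl pvSenderStep acc) (i, m)
              = pvLine i ((pvDictOf acc).getD name "") (pvMsgGet m "text") := by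
            unfold pvBLine
            simp only [← hnm, hrole, hname]
            rw [pvDictOf_getD acc name j hnd hj]
            rw [pvIndex_full ms acc name hmem, hj]
            simp [pvLabel]
          simp [hbl]
        · -- fresh sender: gets label chr(65 + |acc|) and is appended
          have hstep : pvSenderStep acc m = acc ++ [name] := by
            unfold pvSenderStep pvHuman
            rw [if_pos]
            simp [← hnm, List.contains_eq_mem, hmem, hrole, hname]
          have hnd' : (acc ++ [name]).Nodup := by
            simp only [List.nodup_append]
            exact ⟨hnd, List.nodup_singleton _, by intro a ha e he eq; rw [List.mem_singleton] at he; exact hmem (by rw [← he, ← eq]; exact ha)⟩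
          have hlabel : String.ofList [Char.ofNat ((65 : Int) + (acc.length : Int)).toNat]
              = pvLabel acc.length := by
            have h1 : ((65 : Int) + (acc.length : Int)).toNat = 65 + acc.length := by omega
            unfold pvLabel
            rw [h1]
          have hgd : (pvDictOf (acc ++ [name])).getD name "" = pvLabel acc.length := by
            apply pvDictOf_getD _ _ _ hnd'
            exact PySem.List.index?_append_singleton_self acc name hmem
          have hA : pvAStep ((pvDictOf acc, (65 : Int) + acc.length), lines) (i, m)
              = ((pvDictOf (acc ++ [name]), (65 : Int) + ((acc ++ [name]).length : Int)),
                 lines ++ [pvLine i (pvLabel acc.length) (pvMsgGet m "text")]) := by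
            unfold pvAStep
            rw [if_neg (by simp [hrole, ← hnm, hname])]
            simp only [← hnm, pvDictOf_contains, List.contains_eq_mem, hmem, decide_false,
              Bool.false_eq_true, if_false]
            rw [hlabel, pvDictOf_insert acc name hmem, hgd]
            have hc1 : (65 : Int) + (acc.length : Int) + 1
                = (65 : Int) + ((acc ++ [name]).length : Int) := by
              simp only [List.length_append, List.length_singleton]
              push_cast
              ring
            rw [hc1]
          rw [hA, ih (acc ++ [name]) (i + 1) _ hnd', hstep]
          have hidx : PySem.List.index? (ms.foldl pvSenderStep (acc ++ [name])) name
              = some acc.length := by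
            rw [pvIndex_full ms (acc ++ [name]) name (by simp)]
            exact PySem.List.index?_append_singleton_self acc name hmem
          have hbl : pvBLine (ms.foldl pvSenderStep (acc ++ [name])) (i, m)
              = pvLine i (pvLabel acc.length) (pvMsgGet m "text") := by
            unfold pvBLine
            simp only [← hnm, hrole, hname, hidx]
            simp [pvLabel]
          simp [hbl]


-- ---- B-side machinery: gold characterization of the two passes ----

theorem pvLookup_filter_ne (g : List (String × Int)) (name k : String) (h : k ≠ name) :
    pvLookup (g.filter (fun q => !(q.1 == name))) k = pvLookup g k := by
  induction g with
  | nil => rfl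
  | cons q t ih =>
      cases q with
      | mk a b =>
        by_cases ha : a = name
        · rw [List.filter_cons_of_neg (by simp [ha]), ih]
          simp only [pvLookup]
          rw [if_neg (by rw [ha]; exact fun e => h e.symm)]
        · rw [List.filter_cons_of_pos (by simp [ha])]
          simp only [pvLookup]
          by_cases hk : a = k
          · rw [if_pos hk, if_pos hk]
          · rw [if_neg hk, if_neg hk, ih]

theorem pvLookup_eq_none_iff (g : List (String × Int)) (k : String) :
    pvLookup g k = none ↔ k ∉ g.map Prod.fst := by
  induction g with
  | nil => simp [pvLookup]
  | cons q t ih =>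
      cases q with
      | mk a b =>
        simp only [pvLookup]
        by_cases hk : a = k
        · simp [hk]
        · simp only [if_neg hk, ih, List.map_cons, List.mem_cons, not_or]
          constructor
          · exact fun hm => ⟨fun e => hk e.symm, hm⟩
          · exact fun hm => hm.2

theorem pvLookup_of_nodup (g : List (String × Int)) (p : String × Int)
    (hnd : (g.map Prod.fst).Nodup) (hp : p ∈ g) : pvLookup g p.1 = some p.2 := by
  induction g with
  | nil => cases hp
  | cons q t ih =>
      cases q with
      | mk a b =>
        simp only [List.map_cons, List.nodup_cons] at hnd
        rcases List.mem_cons.mp hp with h | h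
        · subst h
          simp [pvLookup]
        · have hne : ¬ a = p.1 := by
            intro e
            exact hnd.1 (by rw [e]; exact List.mem_map.mpr ⟨p, h, rfl⟩)
          simp only [pvLookup]
          rw [if_neg hne]
          exact ih hnd.2 h

theorem pvFirst_get? (l : List (Int × List (String × String))) (k : String) :
    ((l.reverse).foldl pvFirstStep PySem.Dict.empty).get? k = pvLookup (pvGold l) k := by
  rw [List.foldl_reverse]
  induction l with
  | nil => simp [pvGold, pvLookup]
  | cons p t ih =>
      cases p with
      | mk i m =>
        simp only [List.foldr_cons]
        rw [pvFirstStep]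
        simp only [pvGold]
        by_cases hh : pvHuman m = true
        · rw [if_pos hh, if_pos hh]
          rw [PySem.Dict.get?_insert]
          by_cases hk : k = pvMsgGet m "sender_name"
          · rw [if_pos hk]
            simp only [pvLookup]
            rw [if_pos hk.symm]
          · rw [if_neg hk, ih]
            simp only [pvLookup]
            rw [if_neg (fun e => hk e.symm)]
            exact (pvLookup_filter_ne _ _ _ hk).symm
        · rw [if_neg hh, if_neg hh, ih]

theorem pvFirst_keys_nodup (l : List (Int × List (String × String))) :
    ((l.reverse).foldl pvFirstStep PySem.Dict.empty).keys.Nodup := by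
  rw [List.foldl_reverse]
  induction l with
  | nil => simp
  | cons p t ih =>
      simp only [List.foldr_cons]
      rw [pvFirstStep]
      by_cases hh : pvHuman p.2 = true
      · rw [if_pos hh]
        exact PySem.Dict.nodup_keys_insert _ _ _ ih
      · rw [if_neg hh]
        exact ih

theorem pvGold_nodup (l : List (Int × List (String × String))) :
    ((pvGold l).map Prod.fst).Nodup := by
  induction l with
  | nil => simp [pvGold]
  | cons p t ih =>
      cases p with
      | mk i m =>
        simp only [pvGold]
        by_cases hh : pvHuman m = true
        · rw [if_pos hh]
          simp only [List.map_cons, List.nodup_cons]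
          refine ⟨?_, ih.sublist (List.filter_sublist.map Prod.fst)⟩
          intro hmem
          obtain ⟨q, hq, he⟩ := List.mem_map.mp hmem
          have := (List.mem_filter.mp hq).2
          simp [he] at this
        · rw [if_neg hh]
          exact ih

theorem pvGold_snd_mem (l : List (Int × List (String × String))) (p : String × Int)
    (hp : p ∈ pvGold l) : p.2 ∈ l.map Prod.fst := by
  induction l with
  | nil => cases hp
  | cons q t ih =>
      cases q with
      | mk i m =>
        simp only [pvGold] at hp
        by_cases hh : pvHuman m = true
        · rw [if_pos hh] at hp
          rcases List.mem_cons.mp hp with h | h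
          · subst h; simp
          · exact List.mem_cons_of_mem _ (ih (List.mem_filter.mp h).1)
        · rw [if_neg hh] at hp
          exact List.mem_cons_of_mem _ (ih hp)

theorem pvGold_pairwise (l : List (Int × List (String × String)))
    (h : l.Pairwise (fun a b => a.1 < b.1)) :
    (pvGold l).Pairwise (fun a b => a.2 < b.2) := by
  induction l with
  | nil => exact List.Pairwise.nil
  | cons q t ih =>
      cases q with
      | mk i m =>
        rw [List.pairwise_cons] at h
        simp only [pvGold]
        by_cases hh : pvHuman m = true
        · rw [if_pos hh]
          refine List.pairwise_cons.mpr ⟨?_, (ih h.2).sublist (List.filter_sublist)⟩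
          intro p hp
          obtain ⟨b, hb, he⟩ :=
            List.mem_map.mp (pvGold_snd_mem t p (List.mem_filter.mp hp).1)
          exact he ▸ h.1 b hb
        · rw [if_neg hh]
          exact ih h.2

theorem pvGold_mem_of_human (l : List (Int × List (String × String)))
    (m : List (String × String)) (hm : m ∈ l.map Prod.snd) (hh : pvHuman m = true) :
    pvMsgGet m "sender_name" ∈ (pvGold l).map Prod.fst := by
  induction l with
  | nil => cases hm
  | cons q t ih =>
      cases q with
      | mk i m' =>
        simp only [pvGold]
        rw [List.map_cons] at hm
        rcases List.mem_cons.mp hm with h | h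
        · subst h
          rw [if_pos hh]
          simp
        · by_cases hh' : pvHuman m' = true
          · rw [if_pos hh']
            by_cases heq : pvMsgGet m "sender_name" = pvMsgGet m' "sender_name"
            · simp [heq]
            · have := ih h
              simp only [List.map_cons, List.mem_cons]
              right
              obtain ⟨p, hp, he⟩ := List.mem_map.mp this
              exact List.mem_map.mpr ⟨p, List.mem_filter.mpr ⟨hp, by simp [he, heq]⟩, he⟩
          · rw [if_neg hh']
            exact ih h

theorem pvSenders_eq_gold_aux (l : List (Int × List (String × String))) (acc : List String) :
    (l.map Prod.snd).foldl pvSenderStep acc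
      = acc ++ ((pvGold l).filter (fun q => !(acc.contains q.1))).map Prod.fst := by
  induction l generalizing acc with
  | nil => simp [pvGold]
  | cons q t ih =>
      cases q with
      | mk i m =>
        simp only [List.map_cons, List.foldl_cons, pvGold]
        set name := pvMsgGet m "sender_name" with hnm
        by_cases hh : pvHuman m = true
        · rw [if_pos hh]
          by_cases hmem : name ∈ acc
          · have hstep : pvSenderStep acc m = acc := by
              unfold pvSenderStep
              rw [if_neg (by simp [hh, ← hnm, List.contains_eq_mem, hmem])]
            rw [hstep, ih]
            congr 1
            rw [List.filter_cons_of_neg (by simp [List.contains_eq_mem, hmem]),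
              List.filter_filter]
            congr 1
            apply List.filter_congr
            intro x hx
            by_cases h1 : x.1 = name
            · simp [List.contains_eq_mem, h1, hmem]
            · simp [h1]
          · have hstep : pvSenderStep acc m = acc ++ [name] := by
              unfold pvSenderStep
              rw [if_pos (by simp [hh, ← hnm, List.contains_eq_mem, hmem])]
            rw [hstep, ih, List.append_assoc]
            congr 1
            rw [List.filter_cons_of_pos (by simp [List.contains_eq_mem, hmem]),
              List.filter_filter, List.map_cons, List.singleton_append]
            congr 2
            apply List.filter_congr
            intro x hx
            by_cases h1 : x.1 = name <;>
              simp [List.contains_eq_mem, h1, hmem]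
        · rw [if_neg hh]
          have hstep : pvSenderStep acc m = acc := by
            unfold pvSenderStep
            rw [if_neg (by simp [hh])]
          rw [hstep, ih]

theorem pvSenders_eq_gold (messages : List (List (String × String))) :
    messages.foldl pvSenderStep []
      = (pvGold (PySem.List.enumerate messages 0)).map Prod.fst := by
  have h := pvSenders_eq_gold_aux (PySem.List.enumerate messages 0) []
  rw [PySem.List.map_snd_enumerate] at h
  simpa using h

-- sorting the recorded senders by earliest index yields first-appearance order
theorem pvSorted_eq (l : List (Int × List (String × String)))
    (hord : l.Pairwise (fun a b => a.1 < b.1)) :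
    PySem.List.sorted ((l.reverse).foldl pvFirstStep PySem.Dict.empty).keys
        (fun k => ((l.reverse).foldl pvFirstStep PySem.Dict.empty).getD k 0)
      = (pvGold l).map Prod.fst := by
  apply PySem.List.sorted_eq_of_perm_of_pairwise_lt
  · rw [List.perm_ext_iff_of_nodup (pvGold_nodup l) (pvFirst_keys_nodup l)]
    intro a
    have h1 := pvFirst_get? l a
    have h2 := pvLookup_eq_none_iff (pvGold l) a
    constructor
    · intro ha
      by_contra hk
      rw [← PySem.Dict.get?_eq_none_iff_not_mem_keys] at hk
      exact (h2.mp (h1 ▸ hk)) ha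
    · intro ha
      by_contra hk
      have : pvLookup (pvGold l) a = none := h2.mpr hk
      rw [← h1, PySem.Dict.get?_eq_none_iff_not_mem_keys] at this
      exact this ha
  · rw [List.pairwise_map]
    refine (pvGold_pairwise l hord).imp_of_mem ?_
    intro p q hp hq hlt
    have hgp : ((l.reverse).foldl pvFirstStep PySem.Dict.empty).getD p.1 0 = p.2 := by
      rw [PySem.Dict.getD_eq_get?_getD, pvFirst_get?,
        pvLookup_of_nodup (pvGold l) p (pvGold_nodup l) hp]
      rfl
    have hgq : ((l.reverse).foldl pvFirstStep PySem.Dict.empty).getD q.1 0 = q.2 := by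
      rw [PySem.Dict.getD_eq_get?_getD, pvFirst_get?,
        pvLookup_of_nodup (pvGold l) q (pvGold_nodup l) hq]
      rfl
    rw [hgp, hgq]
    exact hlt

-- the label table assigns chr(65+j) to the j-th name of the sorted sender list
theorem pvLabels_getD (names : List String) (hnd : names.Nodup) (name : String) (j : Nat)
    (hj : PySem.List.index? names name = some j) :
    ((PySem.List.enumerate names 0).foldl pvLabelsStep PySem.Dict.empty).getD name ""
      = pvLabel j := by
  obtain ⟨hk, hget, -⟩ := PySem.List.getElem_of_index?_eq_some hj
  have hitems : ((PySem.List.enumerate names 0).foldl pvLabelsStep PySem.Dict.empty).items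
      = (PySem.List.enumerate names 0).map
          (fun p => (p.2, String.ofList [Char.ofNat ((65 : Int) + p.1).toNat])) := by
    have := PySem.Dict.items_foldl_insert_fresh (l := PySem.List.enumerate names 0)
      (k := Prod.snd) (v := fun p => String.ofList [Char.ofNat ((65 : Int) + p.1).toNat])
      (d := PySem.Dict.empty)
      (by intro a ha; exact PySem.Dict.contains_empty _)
      (by rw [PySem.List.map_snd_enumerate]; exact hnd)
    simp at this ⊢
    exact this
  have hkeys : ((PySem.List.enumerate names 0).foldl pvLabelsStep PySem.Dict.empty).keys
      = names := by
    rw [PySem.Dict.keys, hitems, List.map_map]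
    simp [Function.comp_def]
  apply PySem.Dict.getD_of_mem_items
  · rw [hitems]
    have hmem : ((0 : Int) + (j : Int), names[j]) ∈ PySem.List.enumerate names 0 := by
      have := PySem.List.getElem_enumerate (xs := names) (s := 0) (k := j) (by simpa using hk)
      exact this ▸ List.getElem_mem _
    refine List.mem_map.mpr ⟨((0 : Int) + (j : Int), names[j]), hmem, ?_⟩
    simp only [Prod.mk.injEq]
    refine ⟨hget, ?_⟩
    show String.ofList [Char.ofNat ((65 : Int) + ((0 : Int) + (j : Int))).toNat] = pvLabel j
    rw [show ((65 : Int) + ((0 : Int) + (j : Int))).toNat = 65 + j from by omega]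
    rfl
  · rw [hkeys]; exact hnd

-- B's line given the label table
def pvBLineD (labels : PySem.Dict String String) (p : Int × List (String × String)) : String :=
  let name := pvMsgGet p.2 "sender_name"
  let label := if pvMsgGet p.2 "role" == "assistant" || name == "" then "SELF"
               else labels.getD name ""
  pvLine p.1 label (pvMsgGet p.2 "text")

theorem pvBfold (labels : PySem.Dict String String)
    (l : List (Int × List (String × String))) (acc : List String) :
    l.foldl (pvBStep labels) acc = acc ++ l.map (pvBLineD labels) := by
  have h : l.foldl (pvBStep labels) acc
      = l.foldl (fun acc p => acc ++ [pvBLineD labels p]) acc := rfl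
  rw [h, PySem.List.foldl_append_singleton_eq_map]

-- ===== VERDICT (by name: the statement is the Claim_ definition above) =====
theorem build_chat_str_py_spec : Claim_equal_build_chat_str_py := by
  intro messages _
  unfold Spec_build_chat_str_py
  -- A's fold produces the pvBLine lines against the first-appearance sender list S
  have hA := pvMain messages [] 0 [] List.nodup_nil
  have h0 : pvDictOf [] = PySem.Dict.empty := rfl
  rw [h0] at hA
  simp only [List.length_nil, Nat.cast_zero, add_zero, List.nil_append] at hA
  -- notation
  set l := PySem.List.enumerate messages 0 with hl
  set first := (l.reverse).foldl pvFirstStep PySem.Dict.empty with hfirst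
  set labels := (PySem.List.enumerate
      (PySem.List.sorted first.keys (fun k => first.getD k 0)) 0).foldl pvLabelsStep
      PySem.Dict.empty with hlabels
  have hBdef : build_chat_str_py_alt messages
      = PySem.Str.join "\n" (l.foldl (pvBStep labels) []) := rfl
  have hAdef : build_chat_str_py messages
      = PySem.Str.join "\n" ((l.foldl pvAStep ((PySem.Dict.empty, (65 : Int)), [])).2) := rfl
  rw [hAdef, hBdef, pvBfold]
  have hS : messages.foldl pvSenderStep [] = (pvGold l).map Prod.fst :=
    pvSenders_eq_gold messages
  have hsorted : PySem.List.sorted first.keys (fun k => first.getD k 0)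
      = (pvGold l).map Prod.fst :=
    pvSorted_eq l (PySem.List.pairwise_lt_enumerate messages 0)
  -- per-line agreement
  have hmapeq : l.map (pvBLineD labels) = l.map (pvBLine (messages.foldl pvSenderStep [])) := by
    apply List.map_congr_left
    intro p hp
    unfold pvBLineD pvBLine
    by_cases hself : (pvMsgGet p.2 "role" == "assistant" || pvMsgGet p.2 "sender_name" == "") = true
    · simp only [hself]
      simp
    · simp only [hself]
      simp only [Bool.or_eq_true, not_or, Bool.not_eq_true] at hself
      have hh : pvHuman p.2 = true := by
        unfold pvHuman
        simp [hself.1, hself.2]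
      have hmem : pvMsgGet p.2 "sender_name" ∈ (pvGold l).map Prod.fst :=
        pvGold_mem_of_human l p.2 (List.mem_map.mpr ⟨p, hp, rfl⟩) hh
      obtain ⟨j, hj⟩ := Option.isSome_iff_exists.mp
        ((PySem.List.index?_isSome_iff _ _).mpr hmem)
      have hgd : labels.getD (pvMsgGet p.2 "sender_name") "" = pvLabel j := by
        rw [hlabels, hsorted]
        exact pvLabels_getD _ (pvGold_nodup l) _ j hj
      rw [hgd, hS, hj]
      simp
  rw [hmapeq, hA]
  simp
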